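-- pv_equiv track=rewrite | github.com/cfe-lab/proviral | gene_splicer/utils.py | merge_coords
-- ===== SOURCE A (Python) =====
-- def merge_coords(coords1, coords2):
--     """Return new coordinates based on merging coords1 and coords2
--
--     Args:
--         coords1 (dict): A dictionary of coords with key=gene_name, value=[start, end]
--         coords2 (dict): Same as coords1
--     """
--     new_coords = {}
--     for gene in coords2:
--         if gene not in coords1:
--             new_coords[gene] = coords2[gene][:]
--             continue
--         new_coords[gene] = [
--             min(coords2[gene][0], coords1[gene][0]),
--             max(coords1[gene][1], coords2[gene][1])
--         ]
--     for gene in coords1: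
--         if gene not in coords2:
--             new_coords[gene] = coords1[gene][:]
--             continue
--         new_coords[gene] = [
--             min(coords1[gene][0], coords2[gene][0]),
--             max(coords2[gene][1], coords1[gene][1])
--         ]
--     return new_coords
-- ===== SOURCE B (Python) =====
-- def merge_coords(coords1, coords2):
--     """Merge as a single reduction: stream all (gene, span) pairs of coords2
--     then coords1 through one accumulator; a gene seen before widens its stored
--     interval (min start, max end), a gene seen first stores a copy.  No
--     membership test against the other input dict is ever made."""
--     merged = {}
--     for gene, span in list(coords2.items()) + list(coords1.items()):
--         old = merged.get(gene)
--         if old is None: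
--             merged[gene] = span[:]
--         else:
--             merged[gene] = [min(old[0], span[0]), max(old[1], span[1])]
--     return merged
-- ===== Notes on version B (the rewrite author's own statement) =====
-- stated objective: alternative
-- what changed: A runs two separate loops, each testing membership in the OTHER input dict and recomputing every shared gene's span twice; B treats merging as one fold: it streams the concatenated items of coords2 and coords1 through a single accumulator, widening the stored interval when a gene reappears, so the other dict is never consulted and each pair is processed once.
import Mathlib
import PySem

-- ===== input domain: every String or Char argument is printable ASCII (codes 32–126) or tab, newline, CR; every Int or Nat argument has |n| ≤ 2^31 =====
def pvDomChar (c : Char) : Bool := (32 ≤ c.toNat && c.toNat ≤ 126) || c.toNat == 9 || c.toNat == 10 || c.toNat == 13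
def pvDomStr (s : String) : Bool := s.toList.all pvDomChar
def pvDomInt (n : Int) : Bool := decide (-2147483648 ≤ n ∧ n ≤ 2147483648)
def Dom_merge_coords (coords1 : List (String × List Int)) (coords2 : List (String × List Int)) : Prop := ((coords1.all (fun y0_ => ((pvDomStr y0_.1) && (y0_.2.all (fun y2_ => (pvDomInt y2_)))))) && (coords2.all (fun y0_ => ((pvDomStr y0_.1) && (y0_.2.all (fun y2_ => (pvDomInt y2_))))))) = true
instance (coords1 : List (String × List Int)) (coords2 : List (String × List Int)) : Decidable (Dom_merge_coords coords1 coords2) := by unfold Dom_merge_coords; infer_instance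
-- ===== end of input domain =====

-- B merges by a single fold over the concatenated item stream of both dicts (widen the stored
-- interval when a gene reappears), replacing A's two cross-membership-testing loops; objective: alternative.

-- ===== PORT A =====
-- A, transliterated: new_coords = {}; for gene in coords2: …; for gene in coords1: …; return new_coords.
-- Indexing v[0]/v[1] is PySem.List.pyGetD (total form; Pre_ keeps the indices in range exactly
-- where Python would not raise).
def merge_coords (coords1 : List (String × List Int)) (coords2 : List (String × List Int)) : List (String × List Int) :=
  let d1 : PySem.Dict String (List Int) := PySem.Dict.mk coords1
  let d2 : PySem.Dict String (List Int) := PySem.Dict.mk coords2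
  let nc : PySem.Dict String (List Int) :=
    d2.keys.foldl (fun nc gene =>
      if d1.contains gene = false then
        nc.insert gene (d2.getD gene [])
      else
        nc.insert gene
          [min (PySem.List.pyGetD (d2.getD gene []) 0 0) (PySem.List.pyGetD (d1.getD gene []) 0 0),
           max (PySem.List.pyGetD (d1.getD gene []) 1 0) (PySem.List.pyGetD (d2.getD gene []) 1 0)])
      PySem.Dict.empty
  let nc2 : PySem.Dict String (List Int) :=
    d1.keys.foldl (fun nc gene =>
      if d2.contains gene = false then
        nc.insert gene (d1.getD gene [])
      else
        nc.insert gene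
          [min (PySem.List.pyGetD (d1.getD gene []) 0 0) (PySem.List.pyGetD (d2.getD gene []) 0 0),
           max (PySem.List.pyGetD (d2.getD gene []) 1 0) (PySem.List.pyGetD (d1.getD gene []) 1 0)])
      nc
  nc2.items

-- ===== PORT B =====
-- B, transliterated: merged = {}; one for-loop over list(coords2.items()) + list(coords1.items());
-- merged.get(gene) is None → store span[:], else widen to [min(old[0],span[0]), max(old[1],span[1])].
def merge_coords_alt (coords1 : List (String × List Int)) (coords2 : List (String × List Int)) : List (String × List Int) :=
  let merged : PySem.Dict String (List Int) :=
    ((PySem.Dict.mk coords2).items ++ (PySem.Dict.mk coords1).items).foldl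
      (fun m p =>
        match m.get? p.1 with
        | none => m.insert p.1 p.2
        | some old => m.insert p.1
            [min (PySem.List.pyGetD old 0 0) (PySem.List.pyGetD p.2 0 0),
             max (PySem.List.pyGetD old 1 0) (PySem.List.pyGetD p.2 1 0)])
      PySem.Dict.empty
  merged.items

-- ===== PRECONDITION & SPEC =====
-- Pre_ excludes (i) association lists with duplicate keys — a Python dict argument cannot carry
-- them, so their behaviour is an artefact of the encoding — and (ii) inputs where a gene shared by
-- both dicts has a coordinate list of length < 2, on which the Python A raises IndexError.
def Pre_merge_coords (coords1 : List (String × List Int)) (coords2 : List (String × List Int)) : Prop :=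
  (coords1.map Prod.fst).Nodup ∧ (coords2.map Prod.fst).Nodup ∧
  ∀ p ∈ coords1, ∀ q ∈ coords2, p.1 = q.1 → 2 ≤ p.2.length ∧ 2 ≤ q.2.length
instance (coords1 : List (String × List Int)) (coords2 : List (String × List Int)) : Decidable (Pre_merge_coords coords1 coords2) := by unfold Pre_merge_coords; infer_instance

def pvWitness_merge_coords : (List (String × List Int)) × (List (String × List Int)) :=
  ([("env", [10, 20]), ("pol", [5, 9])], [("env", [15, 30]), ("gag", [1, 4])])

def Spec_merge_coords (coords1 : List (String × List Int)) (coords2 : List (String × List Int)) (out : List (String × List Int)) : Prop := out = merge_coords_alt coords1 coords2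
instance (coords1 : List (String × List Int)) (coords2 : List (String × List Int)) (out : List (String × List Int)) : Decidable (Spec_merge_coords coords1 coords2 out) := by unfold Spec_merge_coords; infer_instance

-- ===== CLAIM (what is proved, stated in full; the proofs are below) =====
def Claim_equal_merge_coords : Prop := ∀ (coords1 : List (String × List Int)) (coords2 : List (String × List Int)), Dom_merge_coords coords1 coords2 → Pre_merge_coords coords1 coords2 → Spec_merge_coords coords1 coords2 (merge_coords coords1 coords2)

-- ===== LEMMAS AND PROOFS =====

-- The merged value A's second loop writes for a gene shared by both dicts.
def pvMrg2 (d1 d2 : PySem.Dict String (List Int)) (g : String) : List Int :=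
  [min (PySem.List.pyGetD (d1.getD g []) 0 0) (PySem.List.pyGetD (d2.getD g []) 0 0),
   max (PySem.List.pyGetD (d2.getD g []) 1 0) (PySem.List.pyGetD (d1.getD g []) 1 0)]

-- B's loop body, named for the lemmas below.
def pvStep (m : PySem.Dict String (List Int)) (p : String × List Int) : PySem.Dict String (List Int) :=
  match m.get? p.1 with
  | none => m.insert p.1 p.2
  | some old => m.insert p.1
      [min (PySem.List.pyGetD old 0 0) (PySem.List.pyGetD p.2 0 0),
       max (PySem.List.pyGetD old 1 0) (PySem.List.pyGetD p.2 1 0)]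

-- Overwriting an entry with the value it already holds leaves the dict unchanged.
theorem pvInsert_eq_self (d : PySem.Dict String (List Int)) (k : String) (v : List Int)
    (hnd : d.keys.Nodup) (h : d.get? k = some v) : d.insert k v = d := by
  apply PySem.Dict.ext
  have hc : d.contains k = true := by
    rw [PySem.Dict.contains_eq_isSome_get?, h]; rfl
  rw [PySem.Dict.items_insert_of_contains d v hc]
  have hkv : (k, v) ∈ d.items := PySem.Dict.mem_items_of_get?_eq_some d h
  conv_rhs => rw [← List.map_id d.items]
  apply List.map_eq_map_iff.mpr
  intro p hp
  by_cases hpk : p.1 = k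
  · have : p = (k, v) := List.inj_on_of_nodup_map hnd hp hkv hpk
    simp [this]
  · simp [hpk]

-- A's second loop, over any key-distinct suffix `l` of coords1: shared genes overwrite the
-- accumulator with the value it already holds; fresh genes append their pair.
theorem pvLoop2 (d1 d2 : PySem.Dict String (List Int)) (l : List (String × List Int)) :
    ∀ (acc : PySem.Dict String (List Int)),
    (l.map Prod.fst).Nodup → acc.keys.Nodup →
    (∀ p ∈ l, d1.getD p.1 [] = p.2) →
    (∀ p ∈ l, d2.contains p.1 = true → acc.get? p.1 = some (pvMrg2 d1 d2 p.1)) →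
    (∀ p ∈ l, d2.contains p.1 = false → acc.contains p.1 = false) →
    ((l.map Prod.fst).foldl (fun nc gene =>
        if d2.contains gene = false then nc.insert gene (d1.getD gene [])
        else nc.insert gene (pvMrg2 d1 d2 gene)) acc).items
      = acc.items ++ l.filter (fun p => d2.contains p.1 = false) := by
  induction l with
  | nil => intro acc _ _ _ _ _; simp
  | cons p rest ih =>
    intro acc hnd haccnd hlk hshared hfresh
    have hnd' : (rest.map Prod.fst).Nodup := (List.nodup_cons.mp (by simpa using hnd)).2
    have hp1 : p.1 ∉ rest.map Prod.fst := (List.nodup_cons.mp (by simpa using hnd)).1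
    simp only [List.map_cons, List.foldl_cons]
    by_cases hc : d2.contains p.1 = false
    · rw [if_pos hc, hlk p (by simp)]
      have hnc : acc.contains p.1 = false := hfresh p (by simp) hc
      have hrec := ih (acc.insert p.1 p.2) hnd'
        (PySem.Dict.nodup_keys_insert acc p.1 p.2 haccnd)
        (fun q hq => hlk q (by simp [hq]))
        (fun q hq hq2 => by
          have hne : q.1 ≠ p.1 := fun he => hp1 (he ▸ List.mem_map_of_mem hq)
          rw [PySem.Dict.get?_insert_of_ne acc p.2 hne]
          exact hshared q (by simp [hq]) hq2)
        (fun q hq hq2 => by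
          have hne : q.1 ≠ p.1 := fun he => hp1 (he ▸ List.mem_map_of_mem hq)
          rw [PySem.Dict.contains_insert]
          simp [hne, hfresh q (by simp [hq]) hq2])
      rw [hrec, PySem.Dict.items_insert_of_not_contains acc p.2 hnc]
      simp [hc]
    · have hc' : d2.contains p.1 = true := by simpa using hc
      rw [if_neg hc, pvInsert_eq_self acc p.1 _ haccnd (hshared p (by simp) hc')]
      rw [ih acc hnd' haccnd (fun q hq => hlk q (by simp [hq]))
        (fun q hq hq2 => hshared q (by simp [hq]) hq2)
        (fun q hq hq2 => hfresh q (by simp [hq]) hq2)]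
      simp [hc']

-- A's first loop produces exactly the coords2-ordered merge list as its items.
theorem pvLoop1 (coords1 coords2 : List (String × List Int))
    (hnd2 : (coords2.map Prod.fst).Nodup) :
    ((PySem.Dict.mk coords2).keys.foldl (fun nc gene =>
      if (PySem.Dict.mk coords1).contains gene = false then
        nc.insert gene ((PySem.Dict.mk coords2).getD gene [])
      else
        nc.insert gene
          [min (PySem.List.pyGetD ((PySem.Dict.mk coords2).getD gene []) 0 0)
               (PySem.List.pyGetD ((PySem.Dict.mk coords1).getD gene []) 0 0),
           max (PySem.List.pyGetD ((PySem.Dict.mk coords1).getD gene []) 1 0)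
               (PySem.List.pyGetD ((PySem.Dict.mk coords2).getD gene []) 1 0)])
      PySem.Dict.empty).items
    = coords2.map (fun p =>
        match (PySem.Dict.mk coords1).get? p.1 with
        | some v1 => (p.1, [min (PySem.List.pyGetD v1 0 0) (PySem.List.pyGetD p.2 0 0),
                            max (PySem.List.pyGetD v1 1 0) (PySem.List.pyGetD p.2 1 0)])
        | none => p) := by
  set d1 := PySem.Dict.mk coords1 with hd1
  set d2 := PySem.Dict.mk coords2 with hd2
  have hbody : (fun (nc : PySem.Dict String (List Int)) gene =>
      if d1.contains gene = false then nc.insert gene (d2.getD gene [])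
      else nc.insert gene
        [min (PySem.List.pyGetD (d2.getD gene []) 0 0) (PySem.List.pyGetD (d1.getD gene []) 0 0),
         max (PySem.List.pyGetD (d1.getD gene []) 1 0) (PySem.List.pyGetD (d2.getD gene []) 1 0)])
    = (fun nc gene => nc.insert ((fun (g : String) => g) gene)
        ((fun g => if d1.contains g = false then d2.getD g []
          else [min (PySem.List.pyGetD (d2.getD g []) 0 0) (PySem.List.pyGetD (d1.getD g []) 0 0),
                max (PySem.List.pyGetD (d1.getD g []) 1 0) (PySem.List.pyGetD (d2.getD g []) 1 0)]) gene)) := by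
    funext nc g
    by_cases h : d1.contains g = false <;> simp [h]
  have hkeys : d2.keys = coords2.map Prod.fst := rfl
  rw [hkeys, hbody,
    PySem.Dict.items_foldl_insert_fresh (coords2.map Prod.fst) (fun g => g) _ PySem.Dict.empty
      (fun a _ => by simp) (by simpa using hnd2)]
  rw [List.map_map]
  simp only [show PySem.Dict.empty.items = ([] : List (String × List Int)) from rfl, List.nil_append]
  apply List.map_eq_map_iff.mpr
  intro p hp
  have hget2 : d2.get? p.1 = some p.2 :=
    PySem.Dict.get?_of_mem_items d2 (by exact hp) hnd2
  have hgetD2 : d2.getD p.1 [] = p.2 := by rw [PySem.Dict.getD_eq_get?_getD, hget2]; rfl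
  simp only [Function.comp]
  cases hg1 : d1.get? p.1 with
  | none =>
    have hc : d1.contains p.1 = false := by
      rw [PySem.Dict.contains_eq_isSome_get?, hg1]; rfl
    simp [hc, hgetD2]
  | some v1 =>
    have hc : d1.contains p.1 = true := by
      rw [PySem.Dict.contains_eq_isSome_get?, hg1]; rfl
    have hgetD1 : d1.getD p.1 [] = v1 := by rw [PySem.Dict.getD_eq_get?_getD, hg1]; rfl
    simp [hc, hgetD1, hgetD2, min_comm]

-- A's whole result, under Pre_: the coords2-ordered merged list, then coords1's unique genes.
theorem pvAitems (coords1 coords2 : List (String × List Int))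
    (hnd1 : (coords1.map Prod.fst).Nodup) (hnd2 : (coords2.map Prod.fst).Nodup) :
    merge_coords coords1 coords2
      = coords2.map (fun p =>
          match (PySem.Dict.mk coords1).get? p.1 with
          | some v1 => (p.1, [min (PySem.List.pyGetD v1 0 0) (PySem.List.pyGetD p.2 0 0),
                              max (PySem.List.pyGetD v1 1 0) (PySem.List.pyGetD p.2 1 0)])
          | none => p)
        ++ coords1.filter (fun p => (PySem.Dict.mk coords2).contains p.1 = false) := by
  simp only [merge_coords]
  set d1 := PySem.Dict.mk coords1 with hd1
  set d2 := PySem.Dict.mk coords2 with hd2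
  have h1 := pvLoop1 coords1 coords2 hnd2
  set f : (String × List Int) → (String × List Int) := (fun p =>
      match d1.get? p.1 with
      | some v1 => (p.1, [min (PySem.List.pyGetD v1 0 0) (PySem.List.pyGetD p.2 0 0),
                          max (PySem.List.pyGetD v1 1 0) (PySem.List.pyGetD p.2 1 0)])
      | none => p) with hf
  set L1 : PySem.Dict String (List Int) := d2.keys.foldl (fun nc gene =>
      if d1.contains gene = false then nc.insert gene (d2.getD gene [])
      else nc.insert gene
        [min (PySem.List.pyGetD (d2.getD gene []) 0 0) (PySem.List.pyGetD (d1.getD gene []) 0 0),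
         max (PySem.List.pyGetD (d1.getD gene []) 1 0) (PySem.List.pyGetD (d2.getD gene []) 1 0)])
    PySem.Dict.empty with hL1
  have h1' : L1.items = coords2.map f := h1
  have hL1keys : L1.keys = coords2.map Prod.fst := by
    show L1.items.map Prod.fst = coords2.map Prod.fst
    rw [h1', List.map_map]
    apply List.map_eq_map_iff.mpr
    intro p hp
    cases hg : d1.get? p.1 <;> simp [hf, Function.comp, hg]
  have hL1nd : L1.keys.Nodup := hL1keys ▸ hnd2
  have hlk : ∀ p ∈ coords1, d1.getD p.1 [] = p.2 := fun p hp =>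
    PySem.Dict.getD_of_mem_items d1 hp hnd1 []
  have hsh : ∀ p ∈ coords1, d2.contains p.1 = true → L1.get? p.1 = some (pvMrg2 d1 d2 p.1) := by
    intro p hp hc
    have hsome : (d2.get? p.1).isSome := by
      rw [← PySem.Dict.contains_eq_isSome_get?]; exact hc
    obtain ⟨v2, hv2⟩ := Option.isSome_iff_exists.mp hsome
    have hmem2 : (p.1, v2) ∈ coords2 := PySem.Dict.mem_items_of_get?_eq_some d2 hv2
    have hg1 : d1.get? p.1 = some p.2 := PySem.Dict.get?_of_mem_items d1 hp hnd1
    have hfval : f (p.1, v2) = (p.1, [min (PySem.List.pyGetD p.2 0 0) (PySem.List.pyGetD v2 0 0),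
        max (PySem.List.pyGetD p.2 1 0) (PySem.List.pyGetD v2 1 0)]) := by
      simp [hf, hg1]
    have hmemL1 : (p.1, [min (PySem.List.pyGetD p.2 0 0) (PySem.List.pyGetD v2 0 0),
        max (PySem.List.pyGetD p.2 1 0) (PySem.List.pyGetD v2 1 0)]) ∈ L1.items := by
      rw [h1']
      exact hfval ▸ List.mem_map_of_mem hmem2
    have := PySem.Dict.get?_of_mem_items L1 hmemL1 hL1nd
    rw [this]
    have hgD1 : d1.getD p.1 [] = p.2 := hlk p hp
    have hgD2 : d2.getD p.1 [] = v2 := by rw [PySem.Dict.getD_eq_get?_getD, hv2]; rfl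
    simp [pvMrg2, hgD1, hgD2, max_comm]
  have hfr : ∀ p ∈ coords1, d2.contains p.1 = false → L1.contains p.1 = false := by
    intro p hp hc
    rw [PySem.Dict.contains_eq_decide_mem_keys] at hc ⊢
    rw [hL1keys]
    exact hc
  have h2 := pvLoop2 d1 d2 coords1 L1 hnd1 hL1nd hlk hsh hfr
  exact h2.trans (by rw [h1'])

-- get? on a literal dict is the first match in the list.
theorem pvGet?_eq_find? (l : List (String × List Int)) (k : String) :
    (PySem.Dict.mk l).get? k = (l.find? (fun p => p.1 == k)).map Prod.snd := by
  induction l with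
  | nil => rfl
  | cons p rest ih =>
    rw [show (p :: rest) = ((p.1, p.2) :: rest) from rfl, PySem.Dict.get?_mk_cons]
    by_cases h : p.1 = k
    · simp [h]
    · simp only [List.find?_cons]
      have hb : (p.1 == k) = false := by simpa using h
      rw [hb, if_neg (by simpa using h)]
      exact ih

-- B's fold over fresh, key-distinct pairs appends them all.
theorem pvBfresh (l : List (String × List Int)) :
    ∀ (acc : PySem.Dict String (List Int)),
    (l.map Prod.fst).Nodup → (∀ p ∈ l, acc.contains p.1 = false) →
    (l.foldl pvStep acc).items = acc.items ++ l := by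
  induction l with
  | nil => intro acc _ _; simp
  | cons p rest ih =>
    intro acc hnd hfr
    have hnd' : (rest.map Prod.fst).Nodup := (List.nodup_cons.mp (by simpa using hnd)).2
    have hp1 : p.1 ∉ rest.map Prod.fst := (List.nodup_cons.mp (by simpa using hnd)).1
    have hc : acc.contains p.1 = false := hfr p (by simp)
    have hg : acc.get? p.1 = none := by
      rw [PySem.Dict.contains_eq_isSome_get?] at hc
      exact Option.not_isSome_iff_eq_none.mp (by simp [hc])
    have hstep : pvStep acc p = acc.insert p.1 p.2 := by simp [pvStep, hg]
    rw [List.foldl_cons, hstep, ih (acc.insert p.1 p.2) hnd'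
      (fun q hq => by
        have hne : q.1 ≠ p.1 := fun he => hp1 (he ▸ List.mem_map_of_mem hq)
        rw [PySem.Dict.contains_insert]
        simp [hne, hfr q (by simp [hq])]),
      PySem.Dict.items_insert_of_not_contains acc p.2 hc]
    simp

-- B's fold over a key-distinct list of pairs: each gene already in the accumulator has its stored
-- interval widened in place; each fresh gene is appended.
theorem pvB2 (l : List (String × List Int)) :
    ∀ (acc : PySem.Dict String (List Int)),
    (l.map Prod.fst).Nodup → acc.keys.Nodup →
    (l.foldl pvStep acc).items
      = acc.items.map (fun q => match l.find? (fun p => p.1 == q.1) with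
          | some p => (q.1, [min (PySem.List.pyGetD q.2 0 0) (PySem.List.pyGetD p.2 0 0),
                             max (PySem.List.pyGetD q.2 1 0) (PySem.List.pyGetD p.2 1 0)])
          | none => q)
        ++ l.filter (fun p => acc.contains p.1 = false) := by
  induction l with
  | nil => intro acc _ _; simp
  | cons p rest ih =>
    intro acc hnd haccnd
    have hnd' : (rest.map Prod.fst).Nodup := (List.nodup_cons.mp (by simpa using hnd)).2
    have hp1 : p.1 ∉ rest.map Prod.fst := (List.nodup_cons.mp (by simpa using hnd)).1
    have hrest_none : rest.find? (fun q => q.1 == p.1) = none := by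
      rw [List.find?_eq_none]
      intro q hq hbe
      have he : q.1 = p.1 := by simpa using hbe
      exact hp1 (he ▸ List.mem_map_of_mem hq)
    rw [List.foldl_cons]
    cases hg : acc.get? p.1 with
    | some old =>
      have hc : acc.contains p.1 = true := by
        rw [PySem.Dict.contains_eq_isSome_get?, hg]; rfl
      have hstep : pvStep acc p = acc.insert p.1
          [min (PySem.List.pyGetD old 0 0) (PySem.List.pyGetD p.2 0 0),
           max (PySem.List.pyGetD old 1 0) (PySem.List.pyGetD p.2 1 0)] := by
        simp [pvStep, hg]
      set v := [min (PySem.List.pyGetD old 0 0) (PySem.List.pyGetD p.2 0 0),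
                max (PySem.List.pyGetD old 1 0) (PySem.List.pyGetD p.2 1 0)] with hv
      have hnd'' : (acc.insert p.1 v).keys.Nodup := PySem.Dict.nodup_keys_insert acc p.1 v haccnd
      rw [hstep, ih (acc.insert p.1 v) hnd' hnd'']
      rw [PySem.Dict.items_insert_of_contains acc v hc, List.map_map]
      congr 1
      · apply List.map_eq_map_iff.mpr
        intro q hq
        by_cases hqk : q.1 = p.1
        · have hqold : q = (p.1, old) := by
            have : q = (q.1, q.2) := rfl
            have hqmem : (p.1, old) ∈ acc.items := PySem.Dict.mem_items_of_get?_eq_some acc hg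
            exact List.inj_on_of_nodup_map haccnd hq hqmem hqk
          simp [Function.comp, hqold, hrest_none, hv]
        · have hbe : (q.1 == p.1) = false := by simpa using hqk
          have hbe2 : (p.1 == q.1) = false := beq_eq_false_iff_ne.mpr (fun he => hqk he.symm)
          simp [Function.comp, hqk, hbe2]
      · rw [List.filter_cons_of_neg (by simp [hc])]
        apply List.filter_congr
        intro q hq
        have hne : q.1 ≠ p.1 := fun he => hp1 (he ▸ List.mem_map_of_mem hq)
        rw [PySem.Dict.contains_insert]
        simp [hne]
    | none =>
      have hc : acc.contains p.1 = false := by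
        rw [PySem.Dict.contains_eq_isSome_get?, hg]; rfl
      have hstep : pvStep acc p = acc.insert p.1 p.2 := by simp [pvStep, hg]
      have hnd'' : (acc.insert p.1 p.2).keys.Nodup := PySem.Dict.nodup_keys_insert acc p.1 p.2 haccnd
      rw [hstep, ih (acc.insert p.1 p.2) hnd' hnd'']
      rw [PySem.Dict.items_insert_of_not_contains acc p.2 hc, List.map_append]
      have hnokey : ∀ q ∈ acc.items, q.1 ≠ p.1 := by
        intro q hq he
        have := PySem.Dict.get?_of_mem_items acc hq haccnd
        rw [he, hg] at this
        simp at this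
      have hmapacc : acc.items.map (fun q => match rest.find? (fun r => r.1 == q.1) with
          | some r => (q.1, [min (PySem.List.pyGetD q.2 0 0) (PySem.List.pyGetD r.2 0 0),
                             max (PySem.List.pyGetD q.2 1 0) (PySem.List.pyGetD r.2 1 0)])
          | none => q)
        = acc.items.map (fun q => match (p :: rest).find? (fun r => r.1 == q.1) with
          | some r => (q.1, [min (PySem.List.pyGetD q.2 0 0) (PySem.List.pyGetD r.2 0 0),
                             max (PySem.List.pyGetD q.2 1 0) (PySem.List.pyGetD r.2 1 0)])
          | none => q) := by
        apply List.map_eq_map_iff.mpr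
        intro q hq
        have hbe : (p.1 == q.1) = false := beq_eq_false_iff_ne.mpr (fun he => hnokey q hq he.symm)
        simp [List.find?_cons, hbe]
      have hfilter : (p :: rest).filter (fun q => acc.contains q.1 = false)
          = p :: rest.filter (fun q => (acc.insert p.1 p.2).contains q.1 = false) := by
        rw [List.filter_cons_of_pos (by simp [hc])]
        congr 1
        apply (List.filter_congr _).symm
        intro q hq
        have hne : q.1 ≠ p.1 := fun he => hp1 (he ▸ List.mem_map_of_mem hq)
        rw [PySem.Dict.contains_insert]
        simp [hne]
      rw [hmapacc, hfilter]
      simp [hrest_none]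

-- ===== VERDICT (by name: the statement is the Claim_ definition above) =====
theorem merge_coords_spec : Claim_equal_merge_coords := by
  intro coords1 coords2 _ hpre
  obtain ⟨hnd1, hnd2, hlen⟩ := hpre
  unfold Spec_merge_coords
  rw [pvAitems coords1 coords2 hnd1 hnd2]
  simp only [merge_coords_alt]
  rw [List.foldl_append]
  have hphase1 : (coords2.foldl (fun m p =>
      match m.get? p.1 with
      | none => m.insert p.1 p.2
      | some old => m.insert p.1
          [min (PySem.List.pyGetD old 0 0) (PySem.List.pyGetD p.2 0 0),
           max (PySem.List.pyGetD old 1 0) (PySem.List.pyGetD p.2 1 0)]) PySem.Dict.empty)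
      = coords2.foldl pvStep PySem.Dict.empty := rfl
  rw [hphase1]
  set acc1 := coords2.foldl pvStep PySem.Dict.empty with hacc1
  have hacc1items : acc1.items = coords2 := by
    rw [hacc1, pvBfresh coords2 PySem.Dict.empty hnd2 (fun p _ => by simp)]
    rfl
  have hacc1keys : acc1.keys = coords2.map Prod.fst := by
    show acc1.items.map Prod.fst = coords2.map Prod.fst
    rw [hacc1items]
  have hacc1nd : acc1.keys.Nodup := hacc1keys ▸ hnd2
  have hB : (coords1.foldl (fun m p =>
      match m.get? p.1 with
      | none => m.insert p.1 p.2
      | some old => m.insert p.1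
          [min (PySem.List.pyGetD old 0 0) (PySem.List.pyGetD p.2 0 0),
           max (PySem.List.pyGetD old 1 0) (PySem.List.pyGetD p.2 1 0)]) acc1)
      = coords1.foldl pvStep acc1 := rfl
  rw [hB, pvB2 coords1 acc1 hnd1 hacc1nd, hacc1items]
  congr 1
  · apply List.map_eq_map_iff.mpr
    intro q hq
    rw [show ∀ k, (PySem.Dict.mk coords1).get? k = (coords1.find? (fun p => p.1 == k)).map Prod.snd
        from fun k => pvGet?_eq_find? coords1 k]
    cases hfind : coords1.find? (fun p => p.1 == q.1) with
    | none => simp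
    | some r =>
      have hr1 : r.1 = q.1 := by
        have := List.find?_some hfind
        simpa using this
      simp [min_comm, max_comm]
  · apply List.filter_congr
    intro q hq
    rw [PySem.Dict.contains_eq_decide_mem_keys, PySem.Dict.contains_eq_decide_mem_keys, hacc1keys]
    rfl
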